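-- pv_equiv track=rewrite | github.com/AdamZhouSE/pythonHomework | Code/CodeRecords/2087/60760/316069.py | func
-- ===== SOURCE A (Python) =====
-- import math
--
-- def func(arr:list):
--     num=len(arr)
--     i=num
--     while i>0:
--         for j in range(num+1-i):
--             temp=arr[j:j+num]
--             length=len(temp)
--             boo=0
--             for m in range(length):
--                 for n in range(m+1,length):
--                     if math.gcd(temp[m],temp[n])*math.gcd(temp[m]+1,temp[n]+1)==1: #失败
--                         boo+=1
--                         break
--             if boo==0:
--                return length
--         i-=1
-- ===== SOURCE B (Python) =====
-- import math
--
-- def func(arr: list):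
--     # Scan from the right, growing the longest suffix that contains no pair
--     # (x, y) with gcd(x, y) == 1 and gcd(x+1, y+1) == 1; stop at the first
--     # element that would create such a pair.
--     suffix = []
--     for x in reversed(arr):
--         if any(math.gcd(x, y) == 1 and math.gcd(x + 1, y + 1) == 1 for y in suffix):
--             break
--         suffix.append(x)
--     return len(suffix)
-- ===== Notes on version B (the rewrite author's own statement) =====
-- stated objective: faster
-- what changed: A rescans every window arr[j:] from scratch inside a redundant decreasing-i outer loop with an O(n^2) pair test per window; B does one right-to-left pass that grows the longest pair-free suffix, testing each new element only against the suffix kept so far.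
-- outside the precondition, e.g. on func([]): A returns None, B returns 0
import Mathlib
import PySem

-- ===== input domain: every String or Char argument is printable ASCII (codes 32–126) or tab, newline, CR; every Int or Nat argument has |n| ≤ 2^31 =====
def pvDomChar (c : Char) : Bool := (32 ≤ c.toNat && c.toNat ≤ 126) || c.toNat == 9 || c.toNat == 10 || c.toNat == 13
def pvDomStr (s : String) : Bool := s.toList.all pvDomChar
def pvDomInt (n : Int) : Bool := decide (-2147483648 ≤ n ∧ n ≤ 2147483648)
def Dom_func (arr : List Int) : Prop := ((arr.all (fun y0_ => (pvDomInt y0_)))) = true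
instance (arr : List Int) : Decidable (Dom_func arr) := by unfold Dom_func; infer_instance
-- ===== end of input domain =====

-- B replaces A's repeated per-i rescans of every window by ONE right-to-left scan that
-- grows the longest pair-free suffix (objective: faster, asymptotic).

-- ===== PORT A =====
-- inner 'for n in range(m+1,length): if gcd(..)*gcd(..)==1: boo+=1; break'
def func_inner (temp : List Int) (m : Nat) : List Nat → Nat → Nat
  | [], boo => boo
  | n :: rest, boo =>
    if Int.gcd (temp.getD m 0) (temp.getD n 0) * Int.gcd (temp.getD m 0 + 1) (temp.getD n 0 + 1) == 1
    then boo + 1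
    else func_inner temp m rest boo

-- 'for m in range(length): …'
def func_mloop (temp : List Int) : List Nat → Nat → Nat
  | [], boo => boo
  | m :: rest, boo =>
      func_mloop temp rest (func_inner temp m (List.range' (m + 1) (temp.length - (m + 1))) boo)

-- 'for j in range(num+1-i): temp=arr[j:j+num]; … ; if boo==0: return length'
def func_jloop (arr : List Int) (num : Nat) : List Nat → Option Int
  | [] => none
  | j :: rest =>
    let temp := PySem.List.slice arr (some (j : Int)) (some ((j : Int) + (num : Int)))
    let length := temp.length
    if func_mloop temp (List.range length) 0 = 0 then some (length : Int)
    else func_jloop arr num rest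

-- 'while i>0: … ; i-=1'
def func_iloop (arr : List Int) (num : Nat) : Nat → Option Int
  | 0 => none
  | i + 1 =>
    match func_jloop arr num (List.range (num + 1 - (i + 1))) with
    | some r => some r
    | none => func_iloop arr num i

def func (arr : List Int) : Int :=
  (func_iloop arr arr.length arr.length).getD 0

-- ===== PORT B =====
-- the pair test of Source B: gcd(x,y)==1 and gcd(x+1,y+1)==1
def pr (x y : Int) : Bool := Int.gcd x y == 1 && Int.gcd (x + 1) (y + 1) == 1

-- 'for x in reversed(arr): if any(... for y in suffix): break; suffix.append(x)'
def func_alt_go : List Int → List Int → List Int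
  | [], suffix => suffix
  | x :: rest, suffix =>
    if suffix.any (fun y => pr x y) then suffix
    else func_alt_go rest (suffix ++ [x])

def func_alt (arr : List Int) : Int :=
  ((func_alt_go arr.reverse []).length : Int)

-- ===== PRECONDITION & SPEC =====
-- Pre_ excludes only the empty list, on which A falls through the loop and returns None
-- (not an int); B returns 0 there.
def Pre_func (arr : List Int) : Prop := arr ≠ []
instance (arr : List Int) : Decidable (Pre_func arr) := by unfold Pre_func; infer_instance
def pvWitness_func : List Int := [1, 2]

def Spec_func (arr : List Int) (out : Int) : Prop := out = func_alt arr
instance (arr : List Int) (out : Int) : Decidable (Spec_func arr out) := by unfold Spec_func; infer_instance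

-- ===== CLAIM =====
def Claim_equal_func : Prop := ∀ (arr : List Int), Dom_func arr → Pre_func arr → Spec_func arr (func arr)

-- ===== LEMMAS AND PROOFS =====

-- a list is "good" when no earlier/later pair satisfies the pair test
abbrev Good (t : List Int) : Prop := t.Pairwise (fun x y => pr x y = false)

def maxGood : List Int → Nat
  | [] => 0
  | x :: xs => if Good (x :: xs) then xs.length + 1 else maxGood xs

def firstGood (arr : List Int) : List Nat → Option Int
  | [] => none
  | j :: rest =>
    if Good (arr.drop j) then some ((arr.length - j : Nat) : Int) else firstGood arr rest

lemma pairA_eq_pr (a b : Int) :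
    (Int.gcd a b * Int.gcd (a + 1) (b + 1) == 1) = pr a b := by
  unfold pr
  rw [Bool.eq_iff_iff]
  simp [mul_eq_one]

lemma inner_eq (temp : List Int) (m : Nat) (ns : List Nat) (boo : Nat) :
    func_inner temp m ns boo =
      if ns.any (fun n => pr (temp.getD m 0) (temp.getD n 0)) then boo + 1 else boo := by
  induction ns with
  | nil => simp [func_inner]
  | cons n rest ih =>
    simp only [func_inner, List.any_cons, pairA_eq_pr]
    by_cases h : pr (temp.getD m 0) (temp.getD n 0) = true
    · rw [if_pos h, if_pos (by simp only [Bool.or_eq_true]; exact Or.inl h)]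
    · rw [if_neg h, ih]
      have h' := Bool.not_eq_true _ |>.mp h
      simp only [h', Bool.false_or]

lemma mloop_ge (temp : List Int) (ms : List Nat) (boo : Nat) :
    boo ≤ func_mloop temp ms boo := by
  induction ms generalizing boo with
  | nil => simp [func_mloop]
  | cons m rest ih =>
    simp only [func_mloop, inner_eq]
    split_ifs with h
    · exact le_trans (Nat.le_succ boo) (ih (boo + 1))
    · exact ih boo

lemma mloop_zero (temp : List Int) (ms : List Nat) (boo : Nat) :
    func_mloop temp ms boo = 0 ↔
      boo = 0 ∧ ∀ m ∈ ms,
        (List.range' (m + 1) (temp.length - (m + 1))).any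
          (fun n => pr (temp.getD m 0) (temp.getD n 0)) = false := by
  induction ms generalizing boo with
  | nil => simp [func_mloop]
  | cons m rest ih =>
    simp only [func_mloop, inner_eq]
    split_ifs with h
    · constructor
      · intro hz
        have := mloop_ge temp rest (boo + 1)
        omega
      · rintro ⟨-, hall⟩
        have hm := hall m (List.mem_cons_self ..)
        rw [hm] at h
        exact absurd h (by simp)
    · rw [ih]
      constructor
      · rintro ⟨hb, hall⟩
        refine ⟨hb, fun m' hm' => ?_⟩
        rcases List.mem_cons.mp hm' with rfl | hm'
        · exact Bool.not_eq_true _ |>.mp h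
        · exact hall m' hm'
      · rintro ⟨hb, hall⟩
        exact ⟨hb, fun m' hm' => hall m' (List.mem_cons_of_mem _ hm')⟩

lemma boo_good (temp : List Int) :
    func_mloop temp (List.range temp.length) 0 = 0 ↔ Good temp := by
  rw [mloop_zero]
  simp only [true_and, List.mem_range, List.any_eq_false, List.mem_range'_1]
  rw [Good, List.pairwise_iff_getElem]
  constructor
  · intro h i j hi hj hij
    have := h i hi j ⟨by omega, by omega⟩
    rw [List.getD_eq_getElem temp 0 hi, List.getD_eq_getElem temp 0 hj] at this
    exact Bool.not_eq_true _ |>.mp this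
  · intro h m hm n hn
    have hn2 : n < temp.length := by omega
    rw [List.getD_eq_getElem temp 0 hm, List.getD_eq_getElem temp 0 hn2,
      h m n hm hn2 (by omega)]
    simp

lemma slice_eq (arr : List Int) (j : Nat) :
    PySem.List.slice arr (some (j : Int)) (some ((j : Int) + (arr.length : Int))) = arr.drop j := by
  rw [PySem.List.slice_natCast_add]
  exact List.take_of_length_le (by simp)

lemma jloop_eq (arr : List Int) (js : List Nat) :
    func_jloop arr arr.length js = firstGood arr js := by
  induction js with
  | nil => rfl
  | cons j rest ih =>
    simp only [func_jloop, firstGood, slice_eq]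
    rw [← ih]
    by_cases h : Good (arr.drop j)
    · rw [if_pos ((boo_good _).mpr h), if_pos h, List.length_drop]
    · rw [if_neg (fun hz => h ((boo_good _).mp hz)), if_neg h]

lemma firstGood_append (arr : List Int) (l₁ l₂ : List Nat) :
    firstGood arr (l₁ ++ l₂) =
      ((firstGood arr l₁).rec (firstGood arr l₂) (fun r => some r) : Option Int) := by
  induction l₁ with
  | nil => rfl
  | cons j rest ih =>
    simp only [List.cons_append, firstGood]
    split_ifs with h
    · rfl
    · exact ih

lemma range_split (a b : Nat) (h : a ≤ b) :
    List.range b = List.range a ++ List.range' a (b - a) := by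
  rw [List.range_eq_range', List.range_eq_range']
  have := @List.range'_append 0 a (b - a) 1
  simp only [Nat.zero_add, Nat.one_mul] at this
  rw [this]
  congr 1
  omega

lemma iloop_eq (arr : List Int) (i : Nat) (h1 : 1 ≤ i) (h2 : i ≤ arr.length) :
    func_iloop arr arr.length i = func_jloop arr arr.length (List.range arr.length) := by
  induction i with
  | zero => omega
  | succ i ih =>
    simp only [func_iloop]
    rcases Nat.eq_or_lt_of_le h1 with h | h
    · have : arr.length + 1 - (i + 1) = arr.length := by omega
      rw [this]
      cases hj : func_jloop arr arr.length (List.range arr.length) with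
      | some r => rfl
      | none =>
        have : i = 0 := by omega
        subst this
        rfl
    · have hii : arr.length + 1 - (i + 1) = arr.length - i := by omega
      rw [hii, jloop_eq, jloop_eq,
        range_split (arr.length - i) arr.length (by omega), firstGood_append]
      cases hfg : firstGood arr (List.range (arr.length - i)) with
      | some r => rfl
      | none =>
        simp only []
        rw [ih (by omega) (by omega), jloop_eq,
          range_split (arr.length - i) arr.length (by omega), firstGood_append, hfg]

lemma Good_nil : Good ([] : List Int) := List.Pairwise.nil

lemma Good_drop {t : List Int} (h : Good t) (d : Nat) : Good (t.drop d) :=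
  List.Pairwise.drop h

lemma maxGood_le (t : List Int) : maxGood t ≤ t.length := by
  induction t with
  | nil => simp [maxGood]
  | cons x xs ih =>
    simp only [maxGood]
    split_ifs with h
    · simp
    · simp only [List.length_cons]; omega

lemma maxGood_good (t : List Int) : Good (t.drop (t.length - maxGood t)) := by
  induction t with
  | nil => exact Good_nil
  | cons x xs ih =>
    simp only [maxGood]
    split_ifs with h
    · simpa using h
    · have hle := maxGood_le xs
      have : (x :: xs).length - maxGood xs = (xs.length - maxGood xs) + 1 := by
        simp only [List.length_cons]; omega
      rw [this, List.drop_succ_cons]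
      exact ih

lemma maxGood_max {t : List Int} {j : Nat} (h : Good (t.drop j)) :
    t.length - j ≤ maxGood t := by
  induction t generalizing j with
  | nil => simp
  | cons x xs ih =>
    cases j with
    | zero =>
      rw [List.drop_zero] at h
      have : maxGood (x :: xs) = xs.length + 1 := by
        simp only [maxGood]; rw [if_pos h]
      simp [this]
    | succ i =>
      rw [List.drop_succ_cons] at h
      have := ih h
      have hle := maxGood_le xs
      simp only [maxGood, List.length_cons]
      split_ifs with hg
      · omega
      · omega

lemma Good_of_short (t : List Int) (h : t.length ≤ 1) : Good t := by
  match t with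
  | [] => exact List.Pairwise.nil
  | [x] => simp
  | x :: y :: r => simp at h

lemma maxGood_pos {t : List Int} (h : t ≠ []) : 1 ≤ maxGood t := by
  have hlen : 1 ≤ t.length := List.length_pos_of_ne_nil h
  have hg : Good (t.drop (t.length - 1)) :=
    Good_of_short _ (by simp only [List.length_drop]; omega)
  have := maxGood_max hg
  omega

lemma firstGood_range (arr : List Int) (h : arr ≠ []) :
    ∀ (m a : Nat), a + m = arr.length → a ≤ arr.length - maxGood arr →
      firstGood arr (List.range' a m) = some ((maxGood arr : Nat) : Int) := by
  intro m
  induction m with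
  | zero =>
    intro a ha hle
    have := maxGood_pos h
    have hl : 1 ≤ arr.length := List.length_pos_of_ne_nil h
    omega
  | succ m ih =>
    intro a ha hle
    rw [List.range'_succ]
    simp only [firstGood]
    by_cases hg : Good (arr.drop a)
    · have h1 := maxGood_max hg
      have h2 := maxGood_le arr
      rw [if_pos hg]
      congr 1
      have : arr.length - a = maxGood arr := by omega
      rw [this]
    · rw [if_neg hg]
      apply ih (a + 1) (by omega)
      rcases Nat.eq_or_lt_of_le hle with heq | hlt
      · exact absurd (heq ▸ maxGood_good arr) hg
      · omega

lemma maxGood_eq_of_good {t : List Int} (h : Good t) : maxGood t = t.length :=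
  le_antisymm (maxGood_le t) (by simpa using maxGood_max (j := 0) (by simpa using h))

lemma alt_go_length (l : List Int) :
    ∀ s : List Int, Good s.reverse →
      (func_alt_go l s).length = maxGood (l.reverse ++ s.reverse) := by
  induction l with
  | nil =>
    intro s hs
    simp only [func_alt_go, List.reverse_nil, List.nil_append]
    rw [maxGood_eq_of_good hs, List.length_reverse]
  | cons x rest ih =>
    intro s hs
    simp only [func_alt_go, List.reverse_cons, List.append_assoc, List.singleton_append]
    by_cases hc : s.any (fun y => pr x y) = true
    · rw [if_pos hc]
      obtain ⟨y, hy, hpy⟩ := List.any_eq_true.mp hc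
      set big := rest.reverse ++ x :: s.reverse with hbig
      have hlen : big.length = rest.reverse.length + (s.length + 1) := by
        simp [hbig]
      have hge : s.length ≤ maxGood big := by
        have hdrop : big.drop (rest.reverse.length + 1) = s.reverse := by
          have : big = (rest.reverse ++ [x]) ++ s.reverse := by simp [hbig]
          rw [this]
          have h2 : (rest.reverse ++ [x]).length = rest.reverse.length + 1 := by simp
          rw [← h2, List.drop_left]
        have := maxGood_max (t := big) (j := rest.reverse.length + 1) (by rw [hdrop]; simpa using hs)
        omega
      have hlt : maxGood big ≤ s.length := by
        by_contra hcon
        push Not at hcon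
        have hj : big.length - (s.length + 1) = rest.reverse.length := by omega
        have hgood : Good (big.drop (big.length - (s.length + 1))) := by
          have h1 := maxGood_good big
          have h2 : big.length - (s.length + 1) = (big.length - maxGood big) +
              ((maxGood big) - (s.length + 1)) := by
            have := maxGood_le big
            omega
          rw [h2, ← List.drop_drop]
          exact Good_drop h1 _
        rw [hj] at hgood
        have hdx : big.drop rest.reverse.length = x :: s.reverse := List.drop_left
        rw [hdx] at hgood
        have := (List.pairwise_cons.mp hgood).1 y (by simpa using hy)
        rw [hpy] at this
        exact absurd this (by simp)
      omega
    · rw [if_neg hc]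
      have hgood : Good ((s ++ [x]).reverse) := by
        rw [List.reverse_append, List.reverse_singleton, List.singleton_append]
        rw [Good, List.pairwise_cons]
        refine ⟨fun y hy => ?_, hs⟩
        have := List.any_eq_false.mp (Bool.not_eq_true _ |>.mp hc) y (by simpa using hy)
        simpa using this
      have := ih (s ++ [x]) hgood
      rw [this]
      congr 1
      simp

-- ===== VERDICT =====
theorem func_spec : Claim_equal_func := by
  intro arr hdom hpre
  unfold Spec_func func func_alt
  have hn : 1 ≤ arr.length := List.length_pos_of_ne_nil hpre
  rw [iloop_eq arr arr.length hn (le_refl _), jloop_eq]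
  have hfg := firstGood_range arr hpre arr.length 0 (by omega) (by omega)
  rw [List.range_eq_range'] at *
  rw [hfg]
  have := alt_go_length arr.reverse [] (by exact Good_nil)
  simp only [List.reverse_nil, List.append_nil, List.reverse_reverse] at this
  rw [this]
  rfl
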